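-- pv_equiv track=rewrite | github.com/krbtsv/codewars-repo | python-solutions/katas/kyu_3/faberge_easter_eggs_crush_test.py | height
-- ===== SOURCE A (Python) =====
-- def height(n: int, m: int) -> int:
--     if (n == 0 or m == 0):
--         return 0
--     if (n >= m):
--         return 2 ** m - 1
--
--     res = 0
--     pascal_num = 1
--     for i in range(1, n + 1):
--         pascal_num = pascal_num * (m + 1 - i) // i
--         res += pascal_num
--
--     return res
-- ===== SOURCE B (Python) =====
-- import math
--
-- def height(n: int, m: int) -> int:
--     # Egg-drop doubling recurrence f(j, M) = 2*f(j-1, M-1) + C(M-1, j) + 1, f(0, M) = 0,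
--     # walked down the diagonal from (0, m-t) to (t, m) with t = min(n, m)
--     # (f is constant in its first argument beyond m).
--     t = min(n, m)
--     res = 0
--     for j in range(1, t + 1):
--         res = 2 * res + math.comb(m - t + j - 1, j) + 1
--     return res
-- ===== Notes on version B (the rewrite author's own statement) =====
-- stated objective: alternative
-- what changed: B replaces A's branch analysis plus incremental Pascal-product summation by the egg-drop doubling recurrence f(j,M)=2*f(j-1,M-1)+C(M-1,j)+1 walked down a diagonal of Pascal's triangle: no running binomial factor and no partial-sum accumulation of terms.
-- outside the precondition, e.g. on height(1, -2): A returns -0.75, B returns 0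
import Mathlib
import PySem

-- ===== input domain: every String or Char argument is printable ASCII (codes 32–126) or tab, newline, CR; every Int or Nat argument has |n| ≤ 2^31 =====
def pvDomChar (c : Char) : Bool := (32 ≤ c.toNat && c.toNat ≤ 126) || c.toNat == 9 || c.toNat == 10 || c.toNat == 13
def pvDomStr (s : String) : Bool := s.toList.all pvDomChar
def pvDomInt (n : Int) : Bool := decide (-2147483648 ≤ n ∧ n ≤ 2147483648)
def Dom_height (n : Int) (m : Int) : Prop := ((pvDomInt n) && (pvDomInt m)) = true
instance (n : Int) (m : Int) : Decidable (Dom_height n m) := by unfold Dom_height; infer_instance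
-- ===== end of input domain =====

-- B computes height by the egg-drop doubling recurrence f(j,M) = 2*f(j-1,M-1) + C(M-1,j) + 1
-- instead of A's guard branches plus incremental Pascal-product summation; objective: alternative.

-- ===== PORT A =====
def height (n : Int) (m : Int) : Int :=
  if n = 0 || m = 0 then 0
  else if n ≥ m then 2 ^ m.toNat - 1   -- Python 2 ** m; exact since Pre_ gives 0 ≤ m here
  else
    ((PySem.List.pyRange 1 (n + 1) 1).foldl
      (fun (st : Int × Int) i =>
        let p := PySem.Int.floordiv (st.2 * (m + 1 - i)) i
        (st.1 + p, p)) (0, 1)).1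

-- ===== PORT B =====
-- math.comb ported as binomial coefficient (= Nat.choose, computed via falling factorial);
-- exact for nonnegative arguments (math.comb's domain; every call B makes has m - t + j - 1 ≥ j - 1 ≥ 0).
def pyComb (n k : Nat) : Nat :=
  if n < k then 0 else n.descFactorial k / k.factorial

def height_alt (n : Int) (m : Int) : Int :=
  let t := min n m
  (PySem.List.pyRange 1 (t + 1) 1).foldl
    (fun res j => 2 * res + (pyComb (m - t + j - 1).toNat j.toNat : Int) + 1) 0

-- ===== PRECONDITION & SPEC =====
-- Pre_ excludes m < 0 with m ≤ n and n ≠ 0: there A's `2 ** m - 1` returns a float (not an int),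
-- and B's empty loop gives 0.
def Pre_height (n : Int) (m : Int) : Prop := ¬ (m < 0 ∧ m ≤ n ∧ n ≠ 0)
instance (n : Int) (m : Int) : Decidable (Pre_height n m) := by unfold Pre_height; infer_instance
def pvWitness_height : Int × Int := (3, 5)
def Spec_height (n : Int) (m : Int) (out : Int) : Prop := out = height_alt n m
instance (n : Int) (m : Int) (out : Int) : Decidable (Spec_height n m out) := by unfold Spec_height; infer_instance

-- ===== CLAIM (what is proved, stated in full; the proofs are below) =====
def Claim_equal_height : Prop := ∀ (n : Int) (m : Int), Dom_height n m → Pre_height n m → Spec_height n m (height n m)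

-- ===== LEMMAS AND PROOFS =====

-- G M t = ∑_{k=1}^{t} C(M,k): the common value both ports compute
def Gsum (M t : Nat) : Int := (∑ k ∈ Finset.range (t + 1), (M.choose k : Int)) - 1

lemma pyComb_eq_choose (n k : Nat) : pyComb n k = n.choose k := by
  unfold pyComb
  split_ifs with h
  · exact (Nat.choose_eq_zero_of_lt h).symm
  · exact (Nat.choose_eq_descFactorial_div_factorial n k).symm

lemma Gsum_zero (M : Nat) : Gsum M 0 = 0 := by simp [Gsum]

lemma Gsum_succ (M t : Nat) : Gsum M (t + 1) = Gsum M t + (M.choose (t + 1) : Int) := by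
  simp [Gsum, Finset.sum_range_succ]; ring

-- the doubling step identity B is built on
lemma Gsum_step (M t : Nat) :
    Gsum (M + 1) (t + 1) = 2 * Gsum M t + (M.choose (t + 1) : Int) + 1 := by
  induction t with
  | zero =>
    simp [Gsum, Finset.sum_range_succ]
  | succ t ih =>
    rw [Gsum_succ (M + 1) (t + 1), ih, Gsum_succ M t]
    have : ((M + 1).choose (t + 2) : Int) = (M.choose (t + 1) : Int) + (M.choose (t + 2) : Int) := by
      exact_mod_cast congrArg (Nat.cast (R := Int)) (Nat.choose_succ_succ M (t + 1))
    rw [this]; ring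

-- B's loop up to s steps computes Gsum along the diagonal (peeling the last range element)
lemma B_loop (m t : Int) (hm : t ≤ m) (s : Nat) (hs : (s : Int) ≤ t) :
    (PySem.List.pyRange 1 ((s : Int) + 1) 1).foldl
      (fun res j => 2 * res + (pyComb (m - t + j - 1).toNat j.toNat : Int) + 1) 0
    = Gsum (m - t + s).toNat s := by
  induction s with
  | zero =>
    rw [PySem.List.pyRange_one_eq_nil (by omega)]
    simp [Gsum_zero]
  | succ s ih =>
    have hcast : ((s + 1 : Nat) : Int) + 1 = ((s : Int) + 1) + 1 := by push_cast; ring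
    rw [hcast, PySem.List.pyRange_one_succ_right (by omega : (1 : Int) ≤ (s : Int) + 1),
      List.foldl_append, ih (by omega)]
    simp only [List.foldl_cons, List.foldl_nil]
    have h1 : (m - t + ((s : Int) + 1) - 1).toNat = (m - t + s).toNat := by omega
    have h2 : ((s : Int) + 1).toNat = s + 1 := by omega
    have h3 : (m - t + (s + 1 : Nat)).toNat = (m - t + s).toNat + 1 := by omega
    rw [h1, h2, h3, pyComb_eq_choose, Gsum_step]

-- C(m, i-1) * (m + 1 - i) = C(m, i) * i over Int, for 1 ≤ i (Pascal step identity)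
lemma choose_step (m : Nat) (i : Int) (hi : 1 ≤ i) :
    ((m.choose (i - 1).toNat : Int)) * (m + 1 - i) = (m.choose i.toNat : Int) * i := by
  obtain ⟨k, hk⟩ : ∃ k : Nat, i = (k : Int) + 1 := ⟨(i - 1).toNat, by omega⟩
  subst hk
  have h1 : ((k : Int) + 1 - 1).toNat = k := by omega
  have h2 : ((k : Int) + 1).toNat = k + 1 := by omega
  rw [h1, h2]
  by_cases hkm : k ≤ m
  · have : ((m : Int) + 1 - ((k : Int) + 1)) = ((m - k : Nat) : Int) := by omega
    rw [this]
    exact_mod_cast (Nat.choose_succ_right_eq m k).symm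
  · rw [Nat.choose_eq_zero_of_lt (by omega), Nat.choose_eq_zero_of_lt (by omega)]
    simp

-- A's loop invariant: with pascal = C(m, a-1) on entry, the loop adds ∑_{k ∈ [a,b)} C(m,k) to res
lemma loop_inv (m : Nat) (a b res : Int) (h1 : 1 ≤ a) :
    ((PySem.List.pyRange a b 1).foldl
      (fun (st : Int × Int) i =>
        let p := PySem.Int.floordiv (st.2 * ((m : Int) + 1 - i)) i
        (st.1 + p, p)) (res, (m.choose (a - 1).toNat : Int))).1
    = res + ((PySem.List.pyRange a b 1).map (fun k => (m.choose k.toNat : Int))).sum := by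
  by_cases hab : b ≤ a
  · rw [PySem.List.pyRange_one_eq_nil hab]; simp
  · have hlt : a < b := by omega
    rw [PySem.List.pyRange_one_cons hlt]
    simp only [List.foldl_cons, List.map_cons, List.sum_cons]
    have hp : PySem.Int.floordiv ((m.choose (a - 1).toNat : Int) * ((m : Int) + 1 - a)) a
        = (m.choose a.toNat : Int) := by
      rw [choose_step m a h1, PySem.Int.floordiv_eq_ediv_of_pos (by omega)]
      exact Int.mul_ediv_cancel _ (by omega)
    simp only [hp]
    have ha' : ((a + 1) - 1).toNat = a.toNat := by omega
    have := loop_inv m (a + 1) b (res + (m.choose a.toNat : Int)) (by omega)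
    rw [ha'] at this
    rw [this]; ring
termination_by (b - a).toNat
decreasing_by omega

-- the pyRange choose-sum equals Gsum
lemma sum_head_aux (M : Nat) (t : Nat) :
    ((PySem.List.pyRange 1 ((t : Int) + 1) 1).map (fun k => (M.choose k.toNat : Int))).sum
    = Gsum M t := by
  induction t with
  | zero =>
    rw [PySem.List.pyRange_one_eq_nil (by omega)]
    simp [Gsum_zero]
  | succ t ih =>
    have hcast : ((t + 1 : Nat) : Int) + 1 = ((t : Int) + 1) + 1 := by push_cast; ring
    rw [hcast, PySem.List.pyRange_one_succ_right (by omega : (1 : Int) ≤ (t : Int) + 1),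
      List.map_append, List.sum_append, ih]
    simp only [List.map_cons, List.map_nil, List.sum_cons, List.sum_nil]
    have : ((t : Int) + 1).toNat = t + 1 := by omega
    rw [this, Gsum_succ]
    ring

lemma Gsum_full (m : Nat) : Gsum m m = 2 ^ m - 1 := by
  unfold Gsum
  have h := Nat.sum_range_choose m
  have : (∑ j ∈ Finset.range (m + 1), (m.choose j : Int)) = ((2 ^ m : Nat) : Int) := by
    rw [← h]; push_cast; rfl
  rw [this]; push_cast; ring

-- ===== VERDICT (by name: the statement is the Claim_ definition above) =====
theorem height_spec : Claim_equal_height := by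
  intro n m _ hpre
  unfold Spec_height height height_alt
  simp only []
  by_cases hn0 : n = 0
  · subst hn0
    rw [PySem.List.pyRange_one_eq_nil (by omega)]
    simp
  · by_cases hm0 : m = 0
    · subst hm0
      simp only [hn0, decide_false, decide_true, Bool.false_or, if_pos]
      rw [PySem.List.pyRange_one_eq_nil (by omega)]
      simp
    · simp only [hn0, hm0, decide_false, Bool.or_self, Bool.false_eq_true, if_false]
      by_cases hnm : n ≥ m
      · -- A returns 2^m - 1; Pre_ forces 0 < m; B's diagonal has t = m steps
        have hm : 0 < m := by
          rcases lt_trichotomy m 0 with h | h | h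
          · exact absurd ⟨h, hnm, hn0⟩ hpre
          · exact absurd h hm0
          · exact h
        rw [if_pos hnm]
        have ht : min n m = m := min_eq_right hnm
        have hB := B_loop m (min n m) (by omega) m.toNat (by omega)
        have hc : ((m.toNat : Int)) = m := Int.toNat_of_nonneg (le_of_lt hm)
        rw [hc, ht] at hB
        have : (m - m + m).toNat = m.toNat := by omega
        rw [this, Gsum_full] at hB
        rw [ht, hB]
      · -- loop branch; t = n
        rw [if_neg hnm]
        by_cases hn : 0 < n
        · have hm : 0 < m := by omega
          have hcm : ((m.toNat : Int)) = m := Int.toNat_of_nonneg (le_of_lt hm)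
          have hA := loop_inv m.toNat 1 (n + 1) 0 (by omega)
          rw [hcm] at hA
          simp only [show ((1 : Int) - 1).toNat = 0 by omega, Nat.choose_zero_right,
            Nat.cast_one] at hA
          have hcn : ((n.toNat : Int)) = n := Int.toNat_of_nonneg (le_of_lt hn)
          have hsum := sum_head_aux m.toNat n.toNat
          rw [hcn] at hsum
          have ht : min n m = n := min_eq_left (by omega)
          have hB := B_loop m (min n m) (by omega) n.toNat (by omega)
          rw [hcn, ht] at hB
          have : (m - n + n).toNat = m.toNat := by omega
          rw [this] at hB
          rw [hA, zero_add, hsum, ht, hB]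
        · -- n < 0: both loops are empty
          rw [PySem.List.pyRange_one_eq_nil (by omega)]
          have ht : min n m + 1 ≤ 1 := by omega
          rw [PySem.List.pyRange_one_eq_nil ht]
          simp
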